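-- pv_equiv track=rewrite | github.com/miliar/Code_Jam_Webscraper | solutions_python/Problem_201/652.py | get_rs
-- ===== SOURCE A (Python) =====
-- import typing
--
-- def get_rs(occupied) -> typing.List[int]:
--     rs = [0] * len(occupied)
--     for i in reversed(range(len(occupied) - 1)):
--         if occupied[i + 1]:
--             rs[i] = 0
--         else:
--             rs[i] = rs[i + 1] + 1
--     return rs
-- ===== SOURCE B (Python) =====
-- def get_rs(occupied):
--     n = len(occupied)
--     rs = [0] * n
--     j = 0
--     while j < n:
--         if occupied[j]:
--             j += 1
--         else:
--             a = j
--             while j < n and not occupied[j]: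
--                 j += 1
--             b = j - 1
--             for i in range(max(a - 1, 0), b):
--                 rs[i] = b - i
--     return rs
-- ===== Notes on version B (the rewrite author's own statement) =====
-- stated objective: alternative
-- what changed: Replaces A's backward recurrence rs[i] = rs[i+1] + 1 with a forward scan that detects each maximal run of falsy slots and fills the affected positions arithmetically (rs[i] = b - i) in one arithmetic pass per run.
import Mathlib
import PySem

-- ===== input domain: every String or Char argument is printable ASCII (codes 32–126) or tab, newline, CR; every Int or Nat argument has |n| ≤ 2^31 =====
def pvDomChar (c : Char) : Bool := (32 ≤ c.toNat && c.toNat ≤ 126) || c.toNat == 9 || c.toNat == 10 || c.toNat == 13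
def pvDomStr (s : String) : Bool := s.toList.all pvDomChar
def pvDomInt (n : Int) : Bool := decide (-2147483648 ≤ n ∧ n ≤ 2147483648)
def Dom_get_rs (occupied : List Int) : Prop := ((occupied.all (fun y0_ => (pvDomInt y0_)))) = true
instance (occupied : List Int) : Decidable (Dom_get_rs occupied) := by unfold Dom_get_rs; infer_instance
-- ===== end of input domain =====

-- B replaces A's backward recurrence rs[i] = rs[i+1] + 1 with a forward scan
-- that finds each maximal falsy run and fills its slots arithmetically
-- (objective: alternative algorithm, same O(n) cost).

-- ===== PORT A =====
-- loop body of A's 'for i in reversed(range(len(occupied) - 1))'; occupied[i+1]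
-- is always in range in that loop, so getD is exact there
def pvStepA (occupied : List Int) (rs : List Int) (i : Nat) : List Int :=
  if occupied.getD (i + 1) 0 ≠ 0 then rs.set i 0
  else rs.set i (rs.getD (i + 1) 0 + 1)

def get_rs (occupied : List Int) : List Int :=
  List.foldl (pvStepA occupied) (List.replicate occupied.length 0)
    ((List.range (occupied.length - 1)).reverse)

-- ===== PORT B =====
-- inner while: 'while j < n and not occupied[j]: j += 1' (occupied[j] in range
-- under the guard, so getD is exact; the fuel argument only bounds the loop,
-- which advances j each step, so fuel = occ.length is always enough)
def pvRunEnd (occ : List Int) : Nat → Nat → Nat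
  | 0, j => j
  | f + 1, j =>
    if j < occ.length ∧ occ.getD j 0 = 0 then pvRunEnd occ f (j + 1) else j

-- 'for i in range(max(a - 1, 0), b): rs[i] = b - i'  (Nat a - 1 = max(a-1,0))
def pvFill (rs : List Int) (a b : Nat) : List Int :=
  List.foldl (fun r i => r.set i ((b : Int) - (i : Int))) rs
    (List.range' (a - 1) (b - (a - 1)))

-- outer while loop of B, state = (rs, j); fuel only bounds the loop (j strictly
-- increases each iteration, so fuel = occ.length is always enough)
def pvOuter (occ : List Int) : Nat → List Int → Nat → List Int
  | 0, rs, _ => rs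
  | f + 1, rs, j =>
    if j < occ.length then
      if occ.getD j 0 ≠ 0 then pvOuter occ f rs (j + 1)
      else pvOuter occ f (pvFill rs j (pvRunEnd occ occ.length j - 1))
        (pvRunEnd occ occ.length j)
    else rs

def get_rs_alt (occupied : List Int) : List Int :=
  pvOuter occupied occupied.length (List.replicate occupied.length 0) 0

-- ===== PRECONDITION & SPEC =====
def Spec_get_rs (occupied : List Int) (out : List Int) : Prop := out = get_rs_alt occupied
instance (occupied : List Int) (out : List Int) : Decidable (Spec_get_rs occupied out) := by unfold Spec_get_rs; infer_instance

-- ===== CLAIM (what is proved, stated in full; the proofs are below) =====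
def Claim_equal_get_rs : Prop := ∀ (occupied : List Int), Dom_get_rs occupied → Spec_get_rs occupied (get_rs occupied)

-- ===== LEMMAS AND PROOFS =====

-- length of the falsy prefix run of a list
def pvRun : List Int → Int
  | [] => 0
  | x :: t => if x ≠ 0 then 0 else pvRun t + 1

-- reference result: rs[i] = falsy run length starting at i+1
def pvF : List Int → List Int
  | [] => []
  | _ :: t => pvRun t :: pvF t

theorem pvF_length (xs : List Int) : (pvF xs).length = xs.length := by
  induction xs with
  | nil => rfl
  | cons x t ih => simp [pvF, ih]

theorem pvF_getD (xs : List Int) : ∀ i : Nat, i + 1 < xs.length →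
    (pvF xs).getD i 0 =
      (if xs.getD (i + 1) 0 ≠ 0 then 0 else (pvF xs).getD (i + 1) 0 + 1) := by
  induction xs with
  | nil => intro i h; simp at h
  | cons x t ih =>
    intro i h
    cases i with
    | zero =>
      cases t with
      | nil => simp at h
      | cons y u =>
        cases u with
        | nil => simp [pvF, pvRun]
        | cons z v => simp [pvF, pvRun]
    | succ j =>
      have h' : j + 1 < t.length := by simpa using h
      simpa [pvF] using ih j h'

theorem pvF_last (xs : List Int) : (pvF xs).getD (xs.length - 1) 0 = 0 := by
  induction xs with
  | nil => rfl
  | cons x t ih =>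
    cases t with
    | nil => simp [pvF, pvRun]
    | cons y u =>
      have : (x :: y :: u).length - 1 = (y :: u).length - 1 + 1 := by
        simp
      rw [this]
      simpa [pvF] using ih

-- A's loop invariant: if the state agrees with pvF at positions ≥ m,
-- running the loop for indices m-1 … 0 yields pvF
theorem pvA_fold (xs : List Int) : ∀ (m : Nat) (s : List Int),
    m + 1 ≤ xs.length → s.length = xs.length →
    (∀ j : Nat, m ≤ j → j < xs.length → s.getD j 0 = (pvF xs).getD j 0) →
    List.foldl (pvStepA xs) s ((List.range m).reverse) = pvF xs := by
  intro m
  induction m with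
  | zero =>
    intro s _ hlen hagree
    simp only [List.range_zero, List.reverse_nil, List.foldl_nil]
    apply List.ext_getElem (by rw [hlen, pvF_length])
    intro i h1 h2
    have := hagree i (Nat.zero_le i) (by omega)
    rwa [List.getD_eq_getElem s 0 h1, List.getD_eq_getElem _ 0 h2] at this
  | succ m ih =>
    intro s hm hlen hagree
    have hrange : (List.range (m + 1)).reverse = m :: (List.range m).reverse := by
      simp [List.range_succ]
    rw [hrange, List.foldl_cons]
    have hm1 : m + 1 < xs.length := by omega
    have hmlt : m < s.length := by omega
    have hset : pvStepA xs s m = s.set m ((pvF xs).getD m 0) := by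
      rw [pvF_getD xs m hm1, ← hagree (m + 1) (by omega) hm1]
      unfold pvStepA
      split_ifs <;> rfl
    rw [hset]
    apply ih
    · omega
    · simpa using hlen
    · intro j hj hjlt
      rcases Nat.eq_or_lt_of_le hj with h | h
      · subst h
        rw [List.getD_eq_getElem _ 0 (by simpa using hmlt),
            List.getElem_set_self, List.getD_eq_getElem _ 0 (by rw [pvF_length]; omega)]
      · have hjs : j < s.length := by omega
        rw [List.getD_eq_getElem _ 0 (by simpa using hjs),
            List.getElem_set_ne (by omega), ← List.getD_eq_getElem s 0 hjs]
        exact hagree j (by omega) hjlt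

theorem pvA_eq (xs : List Int) : get_rs xs = pvF xs := by
  unfold get_rs
  cases xs with
  | nil => rfl
  | cons x t =>
    apply pvA_fold
    · simp
    · simp
    · intro j hj hjlt
      simp only [List.length_cons] at hj hjlt
      have hj' : j = (x :: t).length - 1 := by simp; omega
      rw [List.getD_eq_getElem _ 0 (by simpa using hjlt), List.getElem_replicate,
          hj', pvF_last]

-- ===== B-side lemmas =====

theorem pvRunEnd_ge (occ : List Int) : ∀ (f j : Nat), j ≤ pvRunEnd occ f j := by
  intro f
  induction f with
  | zero => intro j; exact le_refl j
  | succ f ih =>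
    intro j
    rw [pvRunEnd]
    by_cases hc : j < occ.length ∧ occ.getD j 0 = 0
    · rw [if_pos hc]; exact le_trans (by omega) (ih (j + 1))
    · rw [if_neg hc]

theorem pvRunEnd_gt (occ : List Int) (f j : Nat) (hf : 1 ≤ f)
    (h1 : j < occ.length) (h2 : occ.getD j 0 = 0) : j < pvRunEnd occ f j := by
  obtain ⟨f', rfl⟩ : ∃ f', f = f' + 1 := ⟨f - 1, by omega⟩
  rw [pvRunEnd, if_pos ⟨h1, h2⟩]
  have := pvRunEnd_ge occ f' (j + 1)
  omega

theorem pvRunEnd_le (occ : List Int) : ∀ (f j : Nat), j ≤ occ.length →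
    pvRunEnd occ f j ≤ occ.length := by
  intro f
  induction f with
  | zero => intro j h; exact h
  | succ f ih =>
    intro j h
    rw [pvRunEnd]
    by_cases hc : j < occ.length ∧ occ.getD j 0 = 0
    · rw [if_pos hc]; exact ih (j + 1) (by omega)
    · rw [if_neg hc]; exact h

theorem pvRunEnd_falsy (occ : List Int) : ∀ (f j k : Nat), j ≤ k →
    k < pvRunEnd occ f j → occ.getD k 0 = 0 := by
  intro f
  induction f with
  | zero => intro j k h1 h2; rw [pvRunEnd] at h2; omega
  | succ f ih =>
    intro j k h1 h2
    rw [pvRunEnd] at h2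
    by_cases hc : j < occ.length ∧ occ.getD j 0 = 0
    · rw [if_pos hc] at h2
      rcases Nat.eq_or_lt_of_le h1 with h | h
      · subst h; exact hc.2
      · exact ih (j + 1) k h h2
    · rw [if_neg hc] at h2; omega

theorem pvRunEnd_end (occ : List Int) : ∀ (f j : Nat), occ.length - j ≤ f →
    j ≤ occ.length →
    pvRunEnd occ f j = occ.length ∨ occ.getD (pvRunEnd occ f j) 0 ≠ 0 := by
  intro f
  induction f with
  | zero => intro j h1 h2; rw [pvRunEnd]; left; omega
  | succ f ih =>
    intro j h1 h2
    rw [pvRunEnd]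
    by_cases hc : j < occ.length ∧ occ.getD j 0 = 0
    · rw [if_pos hc]; exact ih (j + 1) (by omega) (by omega)
    · rw [if_neg hc]
      by_cases h : j < occ.length
      · right; intro h0; exact hc ⟨h, h0⟩
      · left; omega

-- foldl of set preserves length
theorem pvSetFold_length (f : Nat → Int) : ∀ (l : List Nat) (rs : List Int),
    (List.foldl (fun r i => r.set i (f i)) rs l).length = rs.length := by
  intro l
  induction l with
  | nil => intro rs; rfl
  | cons a t ih => intro rs; simp [ih]

-- what the fill loop writes, pointwise
theorem pvSetFold_getD (f : Nat → Int) : ∀ (len s : Nat) (rs : List Int),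
    s + len ≤ rs.length → ∀ i : Nat,
    (List.foldl (fun r i => r.set i (f i)) rs (List.range' s len)).getD i 0 =
      if s ≤ i ∧ i < s + len then f i else rs.getD i 0 := by
  intro len
  induction len with
  | zero =>
    intro s rs _ i
    simp only [List.range'_zero, List.foldl_nil]
    rw [if_neg (by omega : ¬ (s ≤ i ∧ i < s + 0))]
  | succ m ih =>
    intro s rs hle i
    have hr : List.range' s (m + 1) = s :: List.range' (s + 1) m := by
      simp [List.range'_succ]
    rw [hr, List.foldl_cons]
    rw [ih (s + 1) (rs.set s (f s)) (by rw [List.length_set]; omega) i]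
    by_cases h1 : s + 1 ≤ i ∧ i < s + 1 + m
    · have : s ≤ i ∧ i < s + (m + 1) := by omega
      simp [h1, this]
    · simp only [h1, if_false]
      by_cases h2 : i = s
      · rw [h2, if_pos (by omega : s ≤ s ∧ s < s + (m + 1)),
            List.getD_eq_getElem _ 0 (by rw [List.length_set]; omega),
            List.getElem_set_self]
      · have : ¬ (s ≤ i ∧ i < s + (m + 1)) := by omega
        simp only [this, if_false]
        by_cases hi : i < rs.length
        · rw [List.getD_eq_getElem _ 0 (by simpa using hi),
              List.getElem_set_ne (by omega), List.getD_eq_getElem rs 0 hi]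
        · rw [List.getD_eq_getElem?_getD, List.getD_eq_getElem?_getD,
              List.getElem?_eq_none (by simpa using (by omega : rs.length ≤ i)),
              List.getElem?_eq_none (by omega : rs.length ≤ i)]

-- run-length of a suffix whose falsy block ends exactly at e
theorem pvRun_drop (occ : List Int) (e : Nat) (he : e ≤ occ.length)
    (hend : e = occ.length ∨ occ.getD e 0 ≠ 0) :
    ∀ d m, e - m ≤ d → m ≤ e → (∀ k, m ≤ k → k < e → occ.getD k 0 = 0) →
    pvRun (occ.drop m) = (e : Int) - m := by
  intro d
  induction d with
  | zero =>
    intro m h1 h2 _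
    have hme : m = e := by omega
    subst hme
    rcases hend with h | h
    · simp [h, List.drop_length, pvRun]
    · have hm : m < occ.length := by
        by_contra hc
        rw [List.getD_eq_getElem?_getD, List.getElem?_eq_none (by omega)] at h
        simp at h
      rw [List.drop_eq_getElem_cons hm]
      have : occ[m] ≠ 0 := by
        rwa [List.getD_eq_getElem _ 0 hm] at h
      simp [pvRun, this]
  | succ d ih =>
    intro m h1 h2 hfalsy
    rcases Nat.eq_or_lt_of_le h2 with h | h
    · subst h
      exact ih m (by omega) (le_refl _) hfalsy
    · have hm : m < occ.length := by omega
      rw [List.drop_eq_getElem_cons hm]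
      have hm0 : occ[m] = 0 := by
        have := hfalsy m (le_refl m) h
        rwa [List.getD_eq_getElem _ 0 hm] at this
      have hrec := ih (m + 1) (by omega) (by omega)
        (fun k hk1 hk2 => hfalsy k (by omega) hk2)
      simp only [pvRun, hm0]
      rw [hrec]
      push_cast
      ring

theorem pvF_getD_run (xs : List Int) : ∀ i : Nat, i < xs.length →
    (pvF xs).getD i 0 = pvRun (xs.drop (i + 1)) := by
  induction xs with
  | nil => intro i h; simp at h
  | cons x t ih =>
    intro i h
    cases i with
    | zero => simp [pvF]
    | succ j => simpa [pvF] using ih j (by simpa using h)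

-- the state at loop exit is exactly pvF
theorem pvDone (occ rs : List Int) (hlen : rs.length = occ.length)
    (h0 : ∀ i : Nat, i < occ.length → occ.length ≤ i + 1 → rs.getD i 0 = 0)
    (hF : ∀ i : Nat, i < occ.length → i + 1 < occ.length →
      rs.getD i 0 = (pvF occ).getD i 0) : rs = pvF occ := by
  apply List.ext_getElem (by rw [hlen, pvF_length])
  intro i hi1 hi2
  have hio : i < occ.length := by omega
  have hgd : rs.getD i 0 = (pvF occ).getD i 0 := by
    by_cases hlast : i + 1 < occ.length
    · exact hF i hio hlast
    · have h00 := h0 i hio (by omega)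
      have hl := pvF_last occ
      have hii : occ.length - 1 = i := by omega
      rw [hii] at hl
      rw [h00, hl]
  rwa [List.getD_eq_getElem rs 0 hi1, List.getD_eq_getElem _ 0 hi2] at hgd

-- B's outer loop invariant
theorem pvOuter_correct (occ : List Int) : ∀ (f j : Nat) (rs : List Int),
    occ.length - j ≤ f → j ≤ occ.length → rs.length = occ.length →
    (∀ i : Nat, i < occ.length → j ≤ i + 1 → rs.getD i 0 = 0) →
    (∀ i : Nat, i < occ.length → i + 1 < j → rs.getD i 0 = (pvF occ).getD i 0) →
    pvOuter occ f rs j = pvF occ := by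
  intro f
  induction f with
  | zero =>
    intro j rs h1 h2 hlen h0 hF
    rw [pvOuter]
    exact pvDone occ rs hlen (fun i hi hi2 => h0 i hi (by omega))
      (fun i hi hi2 => hF i hi (by omega))
  | succ f ih =>
    intro j rs h1 h2 hlen h0 hF
    rw [pvOuter]
    by_cases hj : j < occ.length
    · rw [if_pos hj]
      by_cases hocc : occ.getD j 0 ≠ 0
      · rw [if_pos hocc]
        apply ih (j + 1) rs (by omega) (by omega) hlen
        · intro i hi hji; exact h0 i hi (by omega)
        · intro i hi hji
          rcases Nat.lt_or_ge (i + 1) j with h | h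
          · exact hF i hi h
          · have hij : i + 1 = j := by omega
            rw [h0 i hi (by omega), pvF_getD_run occ i hi]
            have hjlt : j < occ.length := hj
            rw [← hij] at hocc hjlt
            rw [List.drop_eq_getElem_cons (by omega : i + 1 < occ.length)]
            have : occ[i + 1] ≠ 0 := by
              rwa [List.getD_eq_getElem _ 0 (by omega)] at hocc
            simp [pvRun, this]
      · rw [if_neg hocc]
        rw [not_not] at hocc
        set e := pvRunEnd occ occ.length j with he
        have hge : j < e := pvRunEnd_gt occ occ.length j (by omega) hj hocc
        have hle : e ≤ occ.length := pvRunEnd_le occ occ.length j (by omega)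
        have hfalsy : ∀ k, j ≤ k → k < e → occ.getD k 0 = 0 :=
          fun k hk1 hk2 => pvRunEnd_falsy occ occ.length j k hk1 hk2
        have hend : e = occ.length ∨ occ.getD e 0 ≠ 0 :=
          pvRunEnd_end occ occ.length j (by omega) (by omega)
        -- facts about the filled state
        have hfl : (pvFill rs j (e - 1)).length = occ.length := by
          rw [pvFill, pvSetFold_length, hlen]
        have hstart : (j - 1) + ((e - 1) - (j - 1)) = e - 1 := by omega
        have hget : ∀ i : Nat, (pvFill rs j (e - 1)).getD i 0 =
            if j - 1 ≤ i ∧ i < e - 1 then ((e - 1 : Nat) : Int) - (i : Int)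
            else rs.getD i 0 := by
          intro i
          rw [pvFill, pvSetFold_getD _ ((e - 1) - (j - 1)) (j - 1) rs (by omega) i, hstart]
        apply ih e (pvFill rs j (e - 1)) (by omega) hle hfl
        · intro i hi hei
          rw [hget i]
          have : ¬ (j - 1 ≤ i ∧ i < e - 1) := by omega
          rw [if_neg this]
          exact h0 i hi (by omega)
        · intro i hi hie
          rw [hget i]
          by_cases hin : j - 1 ≤ i ∧ i < e - 1
          · rw [if_pos hin]
            rw [pvF_getD_run occ i hi]
            rw [pvRun_drop occ e hle hend (e - (i + 1)) (i + 1) (le_refl _)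
                (by omega) (fun k hk1 hk2 => hfalsy k (by omega) hk2)]
            push_cast [(by omega : 1 ≤ e)]
            ring
          · rw [if_neg hin]
            exact hF i hi (by omega)
    · rw [if_neg hj]
      exact pvDone occ rs hlen (fun i hi hi2 => h0 i hi (by omega))
        (fun i hi hi2 => hF i hi (by omega))

theorem pvB_eq (xs : List Int) : get_rs_alt xs = pvF xs := by
  unfold get_rs_alt
  apply pvOuter_correct xs xs.length 0 _ (by omega) (by omega) (by simp)
  · intro i hi _; simp [List.getD_eq_getElem?_getD, hi]
  · intro i _ h; omega

-- ===== VERDICT (by name: the statement is the Claim_ definition above) =====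
theorem get_rs_spec : Claim_equal_get_rs := by
  intro occupied _
  unfold Spec_get_rs
  rw [pvA_eq, pvB_eq]
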